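-- pv_equiv track=rewrite | github.com/RiddleHe/nanochat | nanorl/scripts/probe_entropy_gradients.py | resolve_row_indices
-- ===== SOURCE A (Python) =====
-- def resolve_row_indices(n_rows: int, row_spec: str) -> list[int]:
--     out = []
--     for item in row_spec.split(","):
--         item = item.strip()
--         if not item:
--             continue
--         if item == "start":
--             idx = 0
--         elif item == "mid":
--             idx = n_rows // 2
--         elif item == "last":
--             idx = n_rows - 1
--         else:
--             idx = int(item)
--         if not (0 <= idx < n_rows):
--             raise ValueError(f"row index {idx} out of range for n_rows={n_rows}")
--         if idx not in out:
--             out.append(idx)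
--     return out
-- ===== SOURCE B (Python) =====
-- def resolve_row_indices(n_rows: int, row_spec: str) -> list[int]:
--     keyword = {"start": 0, "mid": n_rows // 2, "last": n_rows - 1}
--     indices = []
--     for token in row_spec.split(","):
--         item = token.strip()
--         if not item:
--             continue
--         idx = keyword[item] if item in keyword else int(item)
--         if not (0 <= idx < n_rows):
--             raise ValueError(f"row index {idx} out of range for n_rows={n_rows}")
--         indices.append(idx)
--
--     def uniq(xs):
--         # dedup by recursion: keep the head, filter its duplicates out of the tail
--         if not xs:
--             return []
--         return [xs[0]] + uniq([x for x in xs[1:] if x != xs[0]])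
--
--     return uniq(indices)
-- ===== Notes on version B (the rewrite author's own statement) =====
-- stated objective: alternative
-- what changed: B parses keywords via a dict instead of the if-chain, collects all validated indices into a flat list, and deduplicates by a separate recursive pass that keeps each head and filters its duplicates out of the tail, instead of A's interleaved membership-test accumulator loop.
import Mathlib
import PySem

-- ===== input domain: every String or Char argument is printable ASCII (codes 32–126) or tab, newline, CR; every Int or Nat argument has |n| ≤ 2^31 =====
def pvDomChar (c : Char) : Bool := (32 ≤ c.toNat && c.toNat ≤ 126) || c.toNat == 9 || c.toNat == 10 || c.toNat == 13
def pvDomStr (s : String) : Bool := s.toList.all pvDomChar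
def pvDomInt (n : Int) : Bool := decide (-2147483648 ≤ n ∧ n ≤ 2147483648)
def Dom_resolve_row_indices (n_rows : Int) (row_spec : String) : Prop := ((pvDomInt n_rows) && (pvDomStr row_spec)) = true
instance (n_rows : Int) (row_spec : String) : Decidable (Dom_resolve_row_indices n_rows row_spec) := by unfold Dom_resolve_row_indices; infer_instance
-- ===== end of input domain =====

-- B parses keywords via a dict, builds the flat validated index list in one loop, and
-- deduplicates in a separate recursive pass (keep head, filter its duplicates from the tail).

-- ===== PORT A =====
-- A's loop: for each comma token, strip, skip empty, parse (if-chain / int()),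
-- range-check (raise = none), inline membership dedup into the accumulator `out`.
def pvGoA (n : Int) (out : List Int) : List (List Char) → Option (List Int)
  | [] => some out
  | t :: rest =>
    let item := PySem.Chars.strip t
    if item = [] then pvGoA n out rest
    else
      let idx? : Option Int :=
        if item = "start".toList then some 0
        else if item = "mid".toList then some (PySem.Int.floordiv n 2)
        else if item = "last".toList then some (n - 1)
        else PySem.Int.ofChars? item  -- int(item); none = ValueError
      match idx? with
      | none => none
      | some idx =>
        if ¬ (0 ≤ idx ∧ idx < n) then none  -- Python raises ValueError here
        else if out.contains idx then pvGoA n out rest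
        else pvGoA n (out ++ [idx]) rest

def resolve_row_indices (n_rows : Int) (row_spec : String) : List Int :=
  (pvGoA n_rows [] (PySem.Chars.splitOn row_spec.toList ",".toList)).getD []

-- ===== PORT B =====
-- the `keyword` dict of Source B
def pvKwB (n : Int) : PySem.Dict (List Char) Int :=
  PySem.Dict.ofList [("start".toList, 0), ("mid".toList, PySem.Int.floordiv n 2), ("last".toList, n - 1)]

-- Source B's collection loop: strip, skip empty, dict lookup / int(), range check (raise = none), append
def pvLoopB (n : Int) (acc : List Int) : List (List Char) → Option (List Int)
  | [] => some acc
  | t :: rest =>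
    let item := PySem.Chars.strip t
    if item = [] then pvLoopB n acc rest
    else
      let idx? : Option Int :=
        match (pvKwB n).get? item with
        | some v => some v
        | none => PySem.Int.ofChars? item
      match idx? with
      | none => none
      | some idx =>
        if ¬ (0 ≤ idx ∧ idx < n) then none
        else pvLoopB n (acc ++ [idx]) rest

-- Source B's `uniq`: keep the head, filter its duplicates out of the tail, recurse
def pvUniq : List Int → List Int
  | [] => []
  | x :: xs => x :: pvUniq (xs.filter (fun y => y ≠ x))
termination_by xs => xs.length
decreasing_by
  simp
  exact (List.length_filter_le _ _).trans (by simp)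

def resolve_row_indices_alt (n_rows : Int) (row_spec : String) : List Int :=
  match pvLoopB n_rows [] (PySem.Chars.splitOn row_spec.toList ",".toList) with
  | none => []
  | some idxs => pvUniq idxs

-- ===== PRECONDITION & SPEC =====
-- Pre_ excludes exactly the inputs on which A raises ValueError: a non-empty stripped token
-- that is neither a keyword nor an int literal, or one that resolves out of [0, n_rows).
def pvPreTok (n : Int) (t : List Char) : Bool :=
  let item := PySem.Chars.strip t
  if item = [] then true
  else
    match (if item = "start".toList then some (0 : Int)
           else if item = "mid".toList then some (PySem.Int.floordiv n 2)
           else if item = "last".toList then some (n - 1)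
           else PySem.Int.ofChars? item) with
    | none => false
    | some idx => decide (0 ≤ idx ∧ idx < n)

def Pre_resolve_row_indices (n_rows : Int) (row_spec : String) : Prop :=
  (PySem.Chars.splitOn row_spec.toList ",".toList).all (pvPreTok n_rows) = true

instance (n_rows : Int) (row_spec : String) : Decidable (Pre_resolve_row_indices n_rows row_spec) := by
  unfold Pre_resolve_row_indices; infer_instance

def pvWitness_resolve_row_indices : Int × String := (4, "start, 2,mid,last,2")

def Spec_resolve_row_indices (n_rows : Int) (row_spec : String) (out : List Int) : Prop := out = resolve_row_indices_alt n_rows row_spec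
instance (n_rows : Int) (row_spec : String) (out : List Int) : Decidable (Spec_resolve_row_indices n_rows row_spec out) := by unfold Spec_resolve_row_indices; infer_instance

-- ===== CLAIM =====
def Claim_equal_resolve_row_indices : Prop := ∀ (n_rows : Int) (row_spec : String), Dom_resolve_row_indices n_rows row_spec → Pre_resolve_row_indices n_rows row_spec → Spec_resolve_row_indices n_rows row_spec (resolve_row_indices n_rows row_spec)

-- ===== LEMMAS AND PROOFS =====

-- The keyword-dict lookup of B computes the same option as A's if-chain.
lemma pvKw_get? (n : Int) (item : List Char) :
    (pvKwB n).get? item =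
    (if item = "start".toList then some (0 : Int)
     else if item = "mid".toList then some (PySem.Int.floordiv n 2)
     else if item = "last".toList then some (n - 1)
     else none) := by
  simp [pvKwB, PySem.Dict.ofList, PySem.Dict.update, PySem.Dict.get?_insert, PySem.Dict.get?_empty]
  split_ifs <;> simp_all

lemma pvKw_lookup (n : Int) (item : List Char) :
    (match (pvKwB n).get? item with
     | some v => some v
     | none => PySem.Int.ofChars? item) =
    (if item = "start".toList then some (0 : Int)
     else if item = "mid".toList then some (PySem.Int.floordiv n 2)
     else if item = "last".toList then some (n - 1)
     else PySem.Int.ofChars? item) := by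
  rw [pvKw_get?]
  split_ifs <;> rfl

-- On a token list satisfying the per-token precondition, B's loop from acc appends a flat
-- list l of in-range indices, and A's loop from any `out` folds PySem.Set.add of l onto out.
lemma pvKey (n : Int) (toks : List (List Char)) (h : toks.all (pvPreTok n) = true) :
    ∃ l, (∀ acc, pvLoopB n acc toks = some (acc ++ l)) ∧
      ∀ out, pvGoA n out toks = some (List.foldl PySem.Set.add out l) := by
  induction toks with
  | nil => exact ⟨[], fun acc => by simp [pvLoopB], fun out => rfl⟩
  | cons t rest ih =>
    simp only [List.all_cons, Bool.and_eq_true] at h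
    obtain ⟨ht, hrest⟩ := h
    obtain ⟨l, hloop, hgo⟩ := ih hrest
    unfold pvPreTok at ht
    simp only at ht
    by_cases hemp : PySem.Chars.strip t = []
    · refine ⟨l, fun acc => ?_, fun out => ?_⟩
      · simp [pvLoopB, hemp, hloop]
      · simp [pvGoA, hemp, hgo]
    · rw [if_neg hemp] at ht
      set idx? := (if PySem.Chars.strip t = "start".toList then some (0 : Int)
           else if PySem.Chars.strip t = "mid".toList then some (PySem.Int.floordiv n 2)
           else if PySem.Chars.strip t = "last".toList then some (n - 1)
           else PySem.Int.ofChars? (PySem.Chars.strip t)) with hidx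
      cases hi : idx? with
      | none => rw [hi] at ht; simp at ht
      | some idx =>
        rw [hi] at ht
        have hrange : ¬ ¬ (0 ≤ idx ∧ idx < n) := by simpa using of_decide_eq_true ht
        refine ⟨idx :: l, fun acc => ?_, fun out => ?_⟩
        · simp only [pvLoopB]
          rw [if_neg hemp, pvKw_lookup, ← hidx, hi]
          dsimp only
          rw [if_neg hrange, hloop]
          simp
        · simp only [pvGoA]
          rw [if_neg hemp, ← hidx, hi]
          show (if ¬(0 ≤ idx ∧ idx < n) then none
                else if out.contains idx = true then pvGoA n out rest
                else pvGoA n (out ++ [idx]) rest) = _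
          rw [if_neg hrange]
          by_cases hmem : out.contains idx
          · rw [if_pos hmem, hgo]
            have hm : idx ∈ out := by simpa using hmem
            simp [PySem.Set.add, hm]
          · rw [if_neg hmem, hgo]
            have hm : idx ∉ out := by simpa using hmem
            simp [PySem.Set.add, hm]

-- A's membership-dedup fold equals `out ++` B's recursive filter-dedup of the fresh elements.
lemma pvFold_eq_uniq (l : List Int) : ∀ out : List Int,
    List.foldl PySem.Set.add out l = out ++ pvUniq (l.filter (fun x => !(out.contains x))) := by
  induction l with
  | nil => intro out; simp [pvUniq]
  | cons x xs ih =>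
    intro out
    by_cases hx : x ∈ out
    · have h1 : PySem.Set.add out x = out := by simp [PySem.Set.add, hx]
      have h2 : (x :: xs).filter (fun y => !(out.contains y)) = xs.filter (fun y => !(out.contains y)) := by
        simp [hx]
      rw [List.foldl_cons, h1, h2, ih]
    · have h1 : PySem.Set.add out x = out ++ [x] := by simp [PySem.Set.add, hx]
      have h2 : (x :: xs).filter (fun y => !(out.contains y)) =
          x :: xs.filter (fun y => !(out.contains y)) := by
        simp [hx]
      rw [List.foldl_cons, h1, ih, h2, pvUniq, List.filter_filter, List.append_assoc,
        List.singleton_append]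
      have h3 : List.filter (fun y => !(out ++ [x]).contains y) xs
          = List.filter (fun a => decide (a ≠ x) && !out.contains a) xs := by
        apply List.filter_congr
        intro y _
        by_cases hy : y ∈ out <;> by_cases hyx : y = x <;> simp [hy, hyx]
      rw [h3]

-- ===== VERDICT =====
theorem resolve_row_indices_spec : Claim_equal_resolve_row_indices := by
  intro n s _ hpre
  unfold Pre_resolve_row_indices at hpre
  unfold Spec_resolve_row_indices resolve_row_indices resolve_row_indices_alt
  obtain ⟨l, hloop, hgo⟩ := pvKey n _ hpre
  rw [hloop [], hgo]
  simp only [Option.getD_some, List.nil_append]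
  rw [pvFold_eq_uniq]
  simp
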